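-- pv_equiv track=rewrite | github.com/KazukiNoSuzaku/Leetcode | Python/2315_Count_Asterisks.py | countAsterisks
-- ===== SOURCE A (Python) =====
-- def countAsterisks(s):
--     """
--     :type s: str
--     :rtype: int
--     """
--     count = 0
--     inside = False
--
--     for c in s:
--         if c == '|':
--             inside = not inside
--         elif c == '*' and not inside:
--             count += 1
--
--     return count
-- ===== SOURCE B (Python) =====
-- def countAsterisks(s):
--     """
--     :type s: str
--     :rtype: int
--     """
--     return sum(part.count('*') for part in s.split('|')[::2])
-- ===== Notes on version B (the rewrite author's own statement) =====
-- stated objective: idiomatic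
-- what changed: Replaces the per-character boolean state machine with a segment-level pass: split the string on the pipe delimiter and sum the asterisk counts of the even-indexed segments (those outside delimiter pairs).
import Mathlib
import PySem

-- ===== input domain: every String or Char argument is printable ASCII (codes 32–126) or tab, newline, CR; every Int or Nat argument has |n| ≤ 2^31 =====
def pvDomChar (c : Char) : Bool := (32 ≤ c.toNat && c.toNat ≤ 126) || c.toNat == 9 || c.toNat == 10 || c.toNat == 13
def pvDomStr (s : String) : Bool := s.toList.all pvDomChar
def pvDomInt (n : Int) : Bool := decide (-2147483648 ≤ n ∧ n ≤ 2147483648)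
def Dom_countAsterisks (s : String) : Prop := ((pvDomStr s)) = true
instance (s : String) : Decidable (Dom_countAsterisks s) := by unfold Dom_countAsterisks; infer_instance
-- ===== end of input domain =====

-- B replaces A's per-character inside/outside state machine by an idiomatic segment pass:
-- split on '|' and sum the '*' counts of the even-indexed segments.


-- ===== PORT A =====
-- the for-loop over the characters, with state (count, inside)
def pvLoopA : List Char → Int → Bool → Int
  | [], count, _ => count
  | c :: rest, count, inside =>
    if c = '|' then pvLoopA rest count (!inside)
    else if c = '*' ∧ inside = false then pvLoopA rest (count + 1) inside
    else pvLoopA rest count inside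

def countAsterisks (s : String) : Int := pvLoopA s.toList 0 false

-- ===== PORT B =====
-- xs[::2] — every second element starting at index 0
mutual
def pvEvens {α : Type} : List α → List α
  | [] => []
  | x :: xs => x :: pvOdds xs
def pvOdds {α : Type} : List α → List α
  | [] => []
  | _ :: xs => pvEvens xs
end

def countAsterisks_alt (s : String) : Int :=
  ((pvEvens (s.toList.splitOn '|')).map (fun part => (part.count '*' : Int))).sum

-- ===== PRECONDITION & SPEC =====
def Spec_countAsterisks (s : String) (out : Int) : Prop := out = countAsterisks_alt s
instance (s : String) (out : Int) : Decidable (Spec_countAsterisks s out) := by unfold Spec_countAsterisks; infer_instance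

-- ===== CLAIM (what is proved, stated in full; the proofs are below) =====
def Claim_equal_countAsterisks : Prop := ∀ (s : String), Dom_countAsterisks s → Spec_countAsterisks s (countAsterisks s)

-- ===== LEMMAS AND PROOFS =====

def pvSumStars (ll : List (List Char)) : Int := (ll.map (fun part => (part.count '*' : Int))).sum

theorem pvLoopA_eq (l : List Char) : ∀ (count : Int) (inside : Bool),
    pvLoopA l count inside
      = count + (if inside then pvSumStars (pvOdds (l.splitOnP (· == '|')))
                 else pvSumStars (pvEvens (l.splitOnP (· == '|')))) := by
  induction l with
  | nil =>
    intro count inside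
    cases inside <;> simp [pvLoopA, List.splitOnP_nil, pvEvens, pvOdds, pvSumStars]
  | cons c rest ih =>
    intro count inside
    rw [List.splitOnP_cons]
    by_cases hc : c = '|'
    · simp only [pvLoopA, hc, beq_self_eq_true, if_pos]
      rw [ih count (!inside)]
      cases inside <;> simp [pvEvens, pvOdds, pvSumStars]
    · obtain ⟨h, t, hht⟩ := List.exists_cons_of_ne_nil (List.splitOnP_ne_nil (fun x => x == '|') rest)
      rw [hht] at ih ⊢
      have hcb : (c == '|') = false := by simp [hc]
      simp only [hcb, Bool.false_eq_true, if_false, List.modifyHead]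
      cases inside with
      | true =>
        simp only [pvLoopA, if_neg hc, if_neg (by simp : ¬(c = '*' ∧ true = false))]
        rw [ih count true]
        simp [pvOdds]
      | false =>
        by_cases hs : c = '*'
        · simp only [pvLoopA, if_neg hc, if_pos (show c = '*' ∧ false = false from ⟨hs, rfl⟩)]
          rw [ih (count + 1) false]
          simp only [pvEvens, pvOdds, pvSumStars, List.map_cons, List.sum_cons,
            List.count_cons, hs]
          simp
          push_cast
          ring
        · simp only [pvLoopA, if_neg hc, if_neg (by simp [hs] : ¬(c = '*' ∧ false = false))]
          rw [ih count false]
          simp [pvEvens, pvSumStars, List.count_cons, hs]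

-- ===== VERDICT (by name: the statement is the Claim_ definition above) =====
theorem countAsterisks_spec : Claim_equal_countAsterisks := by
  intro s _
  unfold Spec_countAsterisks countAsterisks countAsterisks_alt
  rw [pvLoopA_eq]
  simp [List.splitOn, pvSumStars]
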